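-- pv_equiv track=rewrite | github.com/mcdonaldcm7/alx-higher_level_programming | 0x04-python-more_data_structures/102-complex_delete.py | complex_delete
-- ===== SOURCE A (Python) =====
-- def complex_delete(a_dictionary, value):
--     if a_dictionary is None or value is None:
--         return
--     rm = []
--     for i in a_dictionary:
--         if a_dictionary[i] == value:
--             rm.append(i)
--     for i in rm:
--         del(a_dictionary[i])
--     return (a_dictionary)
-- ===== SOURCE B (Python) =====
-- def complex_delete(a_dictionary, value):
--     if a_dictionary is None or value is None:
--         return
--     kept = {k: v for k, v in a_dictionary.items() if v != value}
--     a_dictionary.clear()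
--     a_dictionary.update(kept)
--     return a_dictionary
-- ===== Notes on version B (the rewrite author's own statement) =====
-- stated objective: simpler
-- what changed: Replaces A's two-phase collect-keys-then-delete loops with a single filter pass that builds the complement dict and rewrites the dict's contents in place (clear+update).
import Mathlib
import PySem

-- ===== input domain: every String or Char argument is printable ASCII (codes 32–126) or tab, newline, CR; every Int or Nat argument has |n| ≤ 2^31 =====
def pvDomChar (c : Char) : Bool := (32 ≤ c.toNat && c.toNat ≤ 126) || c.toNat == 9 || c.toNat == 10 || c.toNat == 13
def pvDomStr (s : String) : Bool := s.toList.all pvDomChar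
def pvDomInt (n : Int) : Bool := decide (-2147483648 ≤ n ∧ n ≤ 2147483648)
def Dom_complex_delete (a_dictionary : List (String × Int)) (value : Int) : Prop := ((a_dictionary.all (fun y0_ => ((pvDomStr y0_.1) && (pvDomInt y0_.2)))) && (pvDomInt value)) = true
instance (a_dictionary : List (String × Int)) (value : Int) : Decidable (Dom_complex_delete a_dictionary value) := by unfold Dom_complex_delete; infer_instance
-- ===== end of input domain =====

-- B replaces A's collect-keys-then-delete loops by one filter pass rebuilding the dict's contents in
-- place (clear+update); equivalence is about the RETURN value (both mutate the dict the same way in Python).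

-- ===== PORT A =====
def complex_delete (a_dictionary : List (String × Int)) (value : Int) : List (String × Int) :=
  -- the 'a_dictionary is None or value is None' guard cannot fire: both arguments are non-None by type
  let d := PySem.Dict.mk a_dictionary
  let rm := (PySem.Dict.keys d).foldl
    (fun rm i => if PySem.Dict.get? d i == some value then rm ++ [i] else rm) []
  (rm.foldl (fun dd i => PySem.Dict.erase dd i) d).items

-- ===== PORT B =====
def complex_delete_alt (a_dictionary : List (String × Int)) (value : Int) : List (String × Int) :=
  -- kept = {k: v for k, v in a_dictionary.items() if v != value}; clear+update makes kept the new contents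
  let kept := a_dictionary.filter (fun kv => kv.2 != value)
  kept

-- ===== PRECONDITION & SPEC =====
-- Pre_ only excludes association lists with duplicate keys, which do not represent any Python dict
-- (dict keys are unique), so no input A accepts is excluded.
def Pre_complex_delete (a_dictionary : List (String × Int)) (value : Int) : Prop :=
  (a_dictionary.map Prod.fst).Nodup
instance (a_dictionary : List (String × Int)) (value : Int) : Decidable (Pre_complex_delete a_dictionary value) := by unfold Pre_complex_delete; infer_instance
def pvWitness_complex_delete : (List (String × Int)) × Int := ([("a", 1), ("b", 2), ("c", 1)], 1)
def Spec_complex_delete (a_dictionary : List (String × Int)) (value : Int) (out : List (String × Int)) : Prop := out = complex_delete_alt a_dictionary value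
instance (a_dictionary : List (String × Int)) (value : Int) (out : List (String × Int)) : Decidable (Spec_complex_delete a_dictionary value out) := by unfold Spec_complex_delete; infer_instance

-- ===== CLAIM (what is proved, stated in full; the proofs are below) =====
def Claim_equal_complex_delete : Prop := ∀ (a_dictionary : List (String × Int)) (value : Int), Dom_complex_delete a_dictionary value → Pre_complex_delete a_dictionary value → Spec_complex_delete a_dictionary value (complex_delete a_dictionary value)

-- ===== LEMMAS AND PROOFS =====

-- erasing each key of rm in turn filters out every pair whose key is in rm
theorem foldl_erase_items (rm : List String) (dd : PySem.Dict String Int) :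
    (rm.foldl (fun dd i => PySem.Dict.erase dd i) dd).items
      = dd.items.filter (fun p => !(rm.contains p.1)) := by
  induction rm generalizing dd with
  | nil => simp
  | cons i rm ih =>
      rw [List.foldl_cons, ih]
      simp only [PySem.Dict.erase, List.filter_filter]
      apply List.filter_congr
      intro p _
      cases h : p.1 == i <;> simp [Bool.and_comm] <;> simp_all

-- ===== VERDICT (by name: the statement is the Claim_ definition above) =====
theorem complex_delete_spec : Claim_equal_complex_delete := by
  intro d value _ hpre
  unfold Spec_complex_delete
  unfold complex_delete complex_delete_alt
  simp only [PySem.List.foldl_append_if, foldl_erase_items, List.map_id', List.nil_append]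
  apply List.filter_congr
  intro p hp
  have hnd : (PySem.Dict.mk d).keys.Nodup := by simpa [PySem.Dict.keys_mk] using hpre
  have hget : (PySem.Dict.mk d).get? p.1 = some p.2 :=
    PySem.Dict.get?_of_mem_items (PySem.Dict.mk d) hp hnd
  have hmem : p.1 ∈ List.filter (fun i => PySem.Dict.get? (PySem.Dict.mk d) i == some value)
      (PySem.Dict.keys (PySem.Dict.mk d)) ↔ p.2 = value := by
    simp only [List.mem_filter, hget, PySem.Dict.keys_mk, List.mem_map]
    constructor
    · rintro ⟨-, h⟩; simpa using h
    · intro h; exact ⟨⟨p, hp, rfl⟩, by simp [h]⟩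
  by_cases h : p.2 = value
  · have hx : p.1 ∈ List.filter (fun i => PySem.Dict.get? (PySem.Dict.mk d) i == some value)
        (PySem.Dict.keys (PySem.Dict.mk d)) := hmem.mpr h
    simp [List.contains_eq_mem, PySem.Dict.keys_mk] at hx ⊢
    simp [hx, h]
  · have hx : p.1 ∉ List.filter (fun i => PySem.Dict.get? (PySem.Dict.mk d) i == some value)
        (PySem.Dict.keys (PySem.Dict.mk d)) := fun hx => h (hmem.mp hx)
    simp only [List.contains_eq_mem]
    simp only [PySem.Dict.keys_mk] at hx
    simp [hx, h] at hx ⊢
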